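-- pv_equiv track=rewrite | github.com/Jay-omnibio/Pick_Place | tools/run_batch_eval.py | _phase_attempts_and_first_try
-- ===== SOURCE A (Python) =====
-- from typing import Dict, List, Optional, Tuple
--
-- PHASE_FIRST_TRY_EDGES: List[Tuple[str, str]] = [
--     ("Reach", "Align"),
--     ("Align", "Descend"),
--     ("Descend", "CloseHold"),
--     ("CloseHold", "LiftTest"),
--     ("LiftTest", "Transit"),
--     ("Transit", "MoveToPlaceAbove"),
--     ("MoveToPlaceAbove", "DescendToPlace"),
--     ("DescendToPlace", "Open"),
--     ("Open", "Retreat"),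
--     ("Retreat", "Done"),
-- ]
--
-- def _phase_attempts_and_first_try(rows: List[dict]) -> Tuple[Dict[str, int], Dict[str, int]]:
--     attempts = {phase: 0 for phase, _ in PHASE_FIRST_TRY_EDGES}
--     pass_transition = {phase: 0 for phase, _ in PHASE_FIRST_TRY_EDGES}
--     if not rows:
--         return attempts, pass_transition
--
--     transitions: List[Tuple[str, str]] = []
--     prev = None
--     for r in rows:
--         cur = str(r.get("phase", "")).strip()
--         if not cur:
--             continue
--         if prev is None:
--             transitions.append(("START", cur))
--         elif cur != prev:
--             transitions.append((prev, cur))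
--         prev = cur
--
--     for _, to_phase in transitions:
--         if to_phase in attempts:
--             attempts[to_phase] += 1
--     for from_phase, to_phase in transitions:
--         if (from_phase, to_phase) in PHASE_FIRST_TRY_EDGES:
--             pass_transition[from_phase] = 1
--
--     first_try = {}
--     for phase, _ in PHASE_FIRST_TRY_EDGES:
--         first_try[phase] = int(attempts.get(phase, 0) == 1 and pass_transition.get(phase, 0) == 1)
--     return attempts, first_try
-- ===== SOURCE B (Python) =====
-- from typing import Dict, List, Tuple
--
-- PHASE_FIRST_TRY_EDGES: List[Tuple[str, str]] = [
--     ("Reach", "Align"),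
--     ("Align", "Descend"),
--     ("Descend", "CloseHold"),
--     ("CloseHold", "LiftTest"),
--     ("LiftTest", "Transit"),
--     ("Transit", "MoveToPlaceAbove"),
--     ("MoveToPlaceAbove", "DescendToPlace"),
--     ("DescendToPlace", "Open"),
--     ("Open", "Retreat"),
--     ("Retreat", "Done"),
-- ]
--
-- def _phase_attempts_and_first_try(rows: List[dict]) -> Tuple[Dict[str, int], Dict[str, int]]:
--     edge_set = set(PHASE_FIRST_TRY_EDGES)
--     phases = [phase for phase, _ in PHASE_FIRST_TRY_EDGES]
--     attempts = dict.fromkeys(phases, 0)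
--     pass_transition = dict.fromkeys(phases, 0)
--     prev = None
--     for r in rows:
--         cur = str(r.get("phase", "")).strip()
--         if not cur:
--             continue
--         if cur != prev:
--             frm = "START" if prev is None else prev
--             if cur in attempts:
--                 attempts[cur] += 1
--             if (frm, cur) in edge_set:
--                 pass_transition[frm] = 1
--         prev = cur
--     first_try = {p: int(attempts[p] == 1 and pass_transition[p] == 1) for p in phases}
--     return attempts, first_try
-- ===== Notes on version B (the rewrite author's own statement) =====
-- stated objective: simpler
-- what changed: Eliminates the intermediate transitions list and its two separate scans: one fused pass over rows maintains prev and updates attempts / pass_transition directly, with the edges in a set and START handled via a default.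
import Mathlib
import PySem

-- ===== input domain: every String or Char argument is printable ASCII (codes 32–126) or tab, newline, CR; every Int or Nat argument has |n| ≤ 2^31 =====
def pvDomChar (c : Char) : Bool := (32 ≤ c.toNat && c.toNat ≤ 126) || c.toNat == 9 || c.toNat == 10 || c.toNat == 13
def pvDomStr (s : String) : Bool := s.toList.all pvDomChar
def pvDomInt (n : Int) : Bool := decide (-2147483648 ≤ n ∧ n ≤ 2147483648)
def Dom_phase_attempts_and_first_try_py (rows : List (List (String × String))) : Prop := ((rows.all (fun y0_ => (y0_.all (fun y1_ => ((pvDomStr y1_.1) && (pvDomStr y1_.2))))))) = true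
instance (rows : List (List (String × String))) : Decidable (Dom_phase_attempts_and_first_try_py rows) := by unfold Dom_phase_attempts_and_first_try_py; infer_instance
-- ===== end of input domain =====

-- B replaces A's intermediate transitions list and its two scans over it by one fused pass over
-- rows that updates the attempts / pass_transition dicts directly (objective: simpler).

-- module-level constant shared by both Pythons
def pvEdges : List (String × String) := [
  ("Reach", "Align"),
  ("Align", "Descend"),
  ("Descend", "CloseHold"),
  ("CloseHold", "LiftTest"),
  ("LiftTest", "Transit"),
  ("Transit", "MoveToPlaceAbove"),
  ("MoveToPlaceAbove", "DescendToPlace"),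
  ("DescendToPlace", "Open"),
  ("Open", "Retreat"),
  ("Retreat", "Done")]

-- str(r.get("phase", "")).strip()  (identical expression in both Pythons)
def pvCur (r : List (String × String)) : String :=
  PySem.Str.strip ((PySem.Dict.mk r).getD "phase" "")

-- ===== PORT A =====
-- body of A's first loop (builds the transitions list, tracking prev)
def pvAStep (st : List (String × String) × Option String) (r : List (String × String)) :
    List (String × String) × Option String :=
  let cur := pvCur r
  if cur = "" then st
  else match st.2 with
    | none => (st.1 ++ [("START", cur)], some cur)
    | some prev => (if cur ≠ prev then st.1 ++ [(prev, cur)] else st.1, some cur)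

-- body of A's second loop: if to_phase in attempts: attempts[to_phase] += 1
def pvAttStep (d : PySem.Dict String Int) (t : String × String) : PySem.Dict String Int :=
  if d.contains t.2 then d.modify t.2 0 (· + 1) else d

-- body of A's third loop: if (from,to) in PHASE_FIRST_TRY_EDGES: pass_transition[from] = 1
def pvPassStep (d : PySem.Dict String Int) (t : String × String) : PySem.Dict String Int :=
  if pvEdges.contains t then d.insert t.1 1 else d

def phase_attempts_and_first_try_py (rows : List (List (String × String))) :
    (List (String × Int)) × (List (String × Int)) :=
  let attempts : PySem.Dict String Int :=
    pvEdges.foldl (fun d e => d.insert e.1 0) PySem.Dict.empty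
  let pass_transition : PySem.Dict String Int :=
    pvEdges.foldl (fun d e => d.insert e.1 0) PySem.Dict.empty
  if rows = [] then (attempts.items, pass_transition.items)
  else
    let transitions := (rows.foldl pvAStep ([], none)).1
    let attempts := transitions.foldl pvAttStep attempts
    let pass_transition := transitions.foldl pvPassStep pass_transition
    let first_try := pvEdges.foldl
      (fun d e => d.insert e.1
        (if attempts.getD e.1 0 == 1 && pass_transition.getD e.1 0 == 1 then (1 : Int) else 0))
      PySem.Dict.empty
    (attempts.items, first_try.items)

-- ===== PORT B =====
-- edge_set = set(PHASE_FIRST_TRY_EDGES)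
def pvEdgeSet : PySem.Set (String × String) := PySem.Set.ofList pvEdges

-- body of B's single fused loop over rows; state = (attempts, pass_transition, prev)
def pvBStep (st : PySem.Dict String Int × PySem.Dict String Int × Option String)
    (r : List (String × String)) :
    PySem.Dict String Int × PySem.Dict String Int × Option String :=
  let cur := pvCur r
  if cur = "" then st
  else if some cur ≠ st.2.2 then
    let frm := st.2.2.getD "START"
    let a := if st.1.contains cur then st.1.modify cur 0 (· + 1) else st.1
    let p := if pvEdgeSet.contains (frm, cur) then st.2.1.insert frm 1 else st.2.1
    (a, p, some cur)
  else (st.1, st.2.1, some cur)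

def phase_attempts_and_first_try_py_alt (rows : List (List (String × String))) :
    (List (String × Int)) × (List (String × Int)) :=
  let phases := pvEdges.map Prod.fst
  let attempts0 : PySem.Dict String Int := PySem.Dict.ofList (phases.map (fun p => (p, (0 : Int))))
  let pass0 : PySem.Dict String Int := PySem.Dict.ofList (phases.map (fun p => (p, (0 : Int))))
  let st := rows.foldl pvBStep (attempts0, pass0, none)
  let first_try := phases.foldl
    (fun d ph => d.insert ph
      (if st.1.getD ph 0 == 1 && st.2.1.getD ph 0 == 1 then (1 : Int) else 0))
    PySem.Dict.empty
  (st.1.items, first_try.items)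

-- ===== PRECONDITION & SPEC =====
def Spec_phase_attempts_and_first_try_py (rows : List (List (String × String))) (out : (List (String × Int)) × (List (String × Int))) : Prop := out = phase_attempts_and_first_try_py_alt rows
instance (rows : List (List (String × String))) (out : (List (String × Int)) × (List (String × Int))) : Decidable (Spec_phase_attempts_and_first_try_py rows out) := by unfold Spec_phase_attempts_and_first_try_py; infer_instance

-- ===== CLAIM (what is proved, stated in full; the proofs are below) =====
def Claim_equal_phase_attempts_and_first_try_py : Prop := ∀ (rows : List (List (String × String))), Dom_phase_attempts_and_first_try_py rows → Spec_phase_attempts_and_first_try_py rows (phase_attempts_and_first_try_py rows)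

-- ===== LEMMAS AND PROOFS =====

-- the transitions list A's first loop produces, as a structural recursion
def pvTrans (prev : Option String) : List (List (String × String)) → List (String × String)
  | [] => []
  | r :: rs =>
    let cur := pvCur r
    if cur = "" then pvTrans prev rs
    else (match prev with
          | none => [("START", cur)]
          | some p => if cur ≠ p then [(p, cur)] else []) ++ pvTrans (some cur) rs

-- the final 'prev' after scanning rows
def pvLast (prev : Option String) : List (List (String × String)) → Option String
  | [] => prev
  | r :: rs =>
    let cur := pvCur r
    if cur = "" then pvLast prev rs else pvLast (some cur) rs

lemma pvEdgeSet_eq : pvEdgeSet = pvEdges := by decide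

lemma pvA_fold (rows : List (List (String × String))) :
    ∀ (acc : List (String × String)) (prev : Option String),
      rows.foldl pvAStep (acc, prev) = (acc ++ pvTrans prev rows, pvLast prev rows) := by
  induction rows with
  | nil => intro acc prev; simp [pvTrans, pvLast]
  | cons r rs ih =>
    intro acc prev
    simp only [List.foldl_cons, pvAStep, pvTrans, pvLast]
    by_cases h : pvCur r = ""
    · simp [h, ih]
    · cases prev with
      | none => simp [h, ih]
      | some p =>
        by_cases hp : pvCur r = p
        · simp [hp, ih]
        · simp [h, hp, ih]

lemma pvB_fold (rows : List (List (String × String))) :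
    ∀ (a p : PySem.Dict String Int) (prev : Option String),
      rows.foldl pvBStep (a, p, prev) =
        ((pvTrans prev rows).foldl pvAttStep a,
         (pvTrans prev rows).foldl pvPassStep p,
         pvLast prev rows) := by
  induction rows with
  | nil => intro a p prev; simp [pvTrans, pvLast]
  | cons r rs ih =>
    intro a p prev
    simp only [List.foldl_cons, pvBStep, pvTrans, pvLast]
    by_cases h : pvCur r = ""
    · simp [h, ih]
    · cases prev with
      | none =>
        simp [h, ih, pvAttStep, pvPassStep, pvEdgeSet_eq, Option.getD]
      | some q =>
        by_cases hq : pvCur r = q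
        · simp [hq, ih]
        · simp [h, hq, ih, pvAttStep, pvPassStep, pvEdgeSet_eq, Option.getD]

lemma pvInit_eq :
    pvEdges.foldl (fun d e => d.insert e.1 0) PySem.Dict.empty =
      PySem.Dict.ofList (((pvEdges.map Prod.fst)).map (fun p => (p, (0 : Int)))) := by
  decide

theorem pv_main (rows : List (List (String × String))) :
    phase_attempts_and_first_try_py rows = phase_attempts_and_first_try_py_alt rows := by
  by_cases hrows : rows = []
  · subst hrows; decide
  · simp only [phase_attempts_and_first_try_py, phase_attempts_and_first_try_py_alt,
      if_neg hrows, pvA_fold, pvB_fold, pvInit_eq, List.nil_append, List.foldl_map]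

-- ===== VERDICT (by name: the statement is the Claim_ definition above) =====
theorem phase_attempts_and_first_try_py_spec : Claim_equal_phase_attempts_and_first_try_py := by
  intro rows _
  unfold Spec_phase_attempts_and_first_try_py
  exact pv_main rows
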